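-- pv_equiv track=rewrite | github.com/pushparani7/Speech-Score | speech_analyzer.py | classify_missing_words
-- ===== SOURCE A (Python) =====
-- def classify_missing_words(missing: list[str]) -> list[str]:
--     """Classify missing words into error types."""
--     errors = []
--     auxiliaries = {"has", "have", "had", "is", "are", "was", "were", "be", "been", "being",
--                    "do", "does", "did", "will", "would", "shall", "should", "may", "might",
--                    "must", "can", "could"}
--     articles = {"a", "an", "the"}
--     prepositions = {"in", "on", "at", "for", "to", "from", "with", "by", "of", "about"}
--
--     missing_aux = [w for w in missing if w in auxiliaries]
--     missing_art = [w for w in missing if w in articles]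
--     missing_prep = [w for w in missing if w in prepositions]
--
--     if missing_aux:
--         errors.append(f"Missing auxiliary verb(s): {', '.join(missing_aux)}")
--     if missing_art:
--         errors.append(f"Missing article(s): {', '.join(missing_art)}")
--     if missing_prep:
--         errors.append(f"Missing preposition(s): {', '.join(missing_prep)}")
--     return errors
-- ===== SOURCE B (Python) =====
-- CATEGORY = {
--     "has": "aux", "have": "aux", "had": "aux", "is": "aux", "are": "aux",
--     "was": "aux", "were": "aux", "be": "aux", "been": "aux", "being": "aux",
--     "do": "aux", "does": "aux", "did": "aux", "will": "aux", "would": "aux",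
--     "shall": "aux", "should": "aux", "may": "aux", "might": "aux",
--     "must": "aux", "can": "aux", "could": "aux",
--     "a": "art", "an": "art", "the": "art",
--     "in": "prep", "on": "prep", "at": "prep", "for": "prep", "to": "prep",
--     "from": "prep", "with": "prep", "by": "prep", "of": "prep", "about": "prep",
-- }
--
-- def classify_missing_words(missing: list[str]) -> list[str]:
--     """Classify missing words into error types (single pass over `missing`)."""
--     buckets = {"aux": [], "art": [], "prep": []}
--     for w in missing:
--         c = CATEGORY.get(w)
--         if c is not None:
--             buckets[c].append(w)
--     errors = []
--     if buckets["aux"]: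
--         errors.append("Missing auxiliary verb(s): " + ", ".join(buckets["aux"]))
--     if buckets["art"]:
--         errors.append("Missing article(s): " + ", ".join(buckets["art"]))
--     if buckets["prep"]:
--         errors.append("Missing preposition(s): " + ", ".join(buckets["prep"]))
--     return errors
-- ===== Notes on version B (the rewrite author's own statement) =====
-- stated objective: alternative
-- what changed: Replaces A's three separate filter passes over `missing` (one per category set) by a single pass that looks each word up in one word-to-category dict and appends it to the matching bucket list, then formats the non-empty buckets in the fixed order.
import Mathlib
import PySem

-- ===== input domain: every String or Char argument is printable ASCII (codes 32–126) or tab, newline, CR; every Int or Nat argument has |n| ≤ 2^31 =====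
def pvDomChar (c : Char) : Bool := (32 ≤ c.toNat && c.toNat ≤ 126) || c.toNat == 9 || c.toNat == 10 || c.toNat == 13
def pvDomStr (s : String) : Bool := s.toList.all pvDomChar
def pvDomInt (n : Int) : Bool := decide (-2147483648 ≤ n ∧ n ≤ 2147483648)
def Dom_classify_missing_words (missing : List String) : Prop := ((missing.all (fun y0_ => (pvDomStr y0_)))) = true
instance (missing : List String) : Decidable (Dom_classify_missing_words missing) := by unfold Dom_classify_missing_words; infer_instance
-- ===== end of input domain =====

-- B replaces A's three category-filter passes by a single pass with one word→category dict
-- feeding three bucket lists (same output order); objective: alternative decomposition.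

-- ===== PORT A =====
def pvAuxSet : PySem.Set String := PySem.Set.ofList
  ["has", "have", "had", "is", "are", "was", "were", "be", "been", "being",
   "do", "does", "did", "will", "would", "shall", "should", "may", "might",
   "must", "can", "could"]
def pvArtSet : PySem.Set String := PySem.Set.ofList ["a", "an", "the"]
def pvPrepSet : PySem.Set String := PySem.Set.ofList
  ["in", "on", "at", "for", "to", "from", "with", "by", "of", "about"]

def classify_missing_words (missing : List String) : List String :=
  let errors : List String := []
  let missing_aux := missing.filter (fun w => PySem.Set.contains pvAuxSet w)
  let missing_art := missing.filter (fun w => PySem.Set.contains pvArtSet w)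
  let missing_prep := missing.filter (fun w => PySem.Set.contains pvPrepSet w)
  let errors := if missing_aux.isEmpty then errors
    else errors ++ ["Missing auxiliary verb(s): " ++ PySem.Str.join ", " missing_aux]
  let errors := if missing_art.isEmpty then errors
    else errors ++ ["Missing article(s): " ++ PySem.Str.join ", " missing_art]
  let errors := if missing_prep.isEmpty then errors
    else errors ++ ["Missing preposition(s): " ++ PySem.Str.join ", " missing_prep]
  errors

-- ===== PORT B =====
def pvCategory : PySem.Dict String String := PySem.Dict.mk
  [("has", "aux"), ("have", "aux"), ("had", "aux"), ("is", "aux"), ("are", "aux"),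
   ("was", "aux"), ("were", "aux"), ("be", "aux"), ("been", "aux"), ("being", "aux"),
   ("do", "aux"), ("does", "aux"), ("did", "aux"), ("will", "aux"), ("would", "aux"),
   ("shall", "aux"), ("should", "aux"), ("may", "aux"), ("might", "aux"),
   ("must", "aux"), ("can", "aux"), ("could", "aux"),
   ("a", "art"), ("an", "art"), ("the", "art"),
   ("in", "prep"), ("on", "prep"), ("at", "prep"), ("for", "prep"), ("to", "prep"),
   ("from", "prep"), ("with", "prep"), ("by", "prep"), ("of", "prep"), ("about", "prep")]

-- single pass: route each word into its bucket via one dict lookup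
def pvBucketLoop : List String → List String × List String × List String →
    List String × List String × List String
  | [], b => b
  | w :: rest, (ba, bart, bp) =>
    pvBucketLoop rest
      (match PySem.Dict.get? pvCategory w with
       | some c =>
         if c = "aux" then (ba ++ [w], bart, bp)
         else if c = "art" then (ba, bart ++ [w], bp)
         else (ba, bart, bp ++ [w])
       | none => (ba, bart, bp))

def classify_missing_words_alt (missing : List String) : List String :=
  let b := pvBucketLoop missing ([], [], [])
  let errors : List String := []
  let errors := if b.1.isEmpty then errors
    else errors ++ ["Missing auxiliary verb(s): " ++ PySem.Str.join ", " b.1]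
  let errors := if b.2.1.isEmpty then errors
    else errors ++ ["Missing article(s): " ++ PySem.Str.join ", " b.2.1]
  let errors := if b.2.2.isEmpty then errors
    else errors ++ ["Missing preposition(s): " ++ PySem.Str.join ", " b.2.2]
  errors

-- ===== PRECONDITION & SPEC =====
def Spec_classify_missing_words (missing : List String) (out : List String) : Prop := out = classify_missing_words_alt missing
instance (missing : List String) (out : List String) : Decidable (Spec_classify_missing_words missing out) := by unfold Spec_classify_missing_words; infer_instance

-- ===== CLAIM (what is proved, stated in full; the proofs are below) =====
def Claim_equal_classify_missing_words : Prop := ∀ (missing : List String), Dom_classify_missing_words missing → Spec_classify_missing_words missing (classify_missing_words missing)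

-- ===== LEMMAS AND PROOFS =====

theorem pvNeqBeq (w s : String) (h : ¬ w = s) : (s == w) = false := by
  simp only [beq_eq_false_iff_ne]
  exact fun h' => h h'.symm

-- the dict lookup agrees with the priority chain of the three set-membership tests
theorem pvCategory_spec (w : String) :
    PySem.Dict.get? pvCategory w =
      (if w ∈ pvAuxSet then some "aux"
       else if w ∈ pvArtSet then some "art"
       else if w ∈ pvPrepSet then some "prep"
       else none) := by
  by_cases h1 : w ∈ pvAuxSet
  · have hm := h1
    simp only [pvAuxSet, PySem.Set.mem_ofList] at hm
    fin_cases hm <;> decide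
  · by_cases h2 : w ∈ pvArtSet
    · have hm := h2
      simp only [pvArtSet, PySem.Set.mem_ofList] at hm
      fin_cases hm <;> decide
    · by_cases h3 : w ∈ pvPrepSet
      · have hm := h3
        simp only [pvPrepSet, PySem.Set.mem_ofList] at hm
        fin_cases hm <;> decide
      · have n1 := h1
        have n2 := h2
        have n3 := h3
        simp only [pvAuxSet, pvArtSet, pvPrepSet, PySem.Set.mem_ofList, List.mem_cons,
          List.not_mem_nil, or_false, not_or] at n1 n2 n3
        simp [pvCategory, PySem.Dict.get?, List.find?, h1, h2, h3,
          pvNeqBeq _ _ n1.1, pvNeqBeq _ _ n1.2.1, pvNeqBeq _ _ n1.2.2.1, pvNeqBeq _ _ n1.2.2.2.1, pvNeqBeq _ _ n1.2.2.2.2.1, pvNeqBeq _ _ n1.2.2.2.2.2.1, pvNeqBeq _ _ n1.2.2.2.2.2.2.1, pvNeqBeq _ _ n1.2.2.2.2.2.2.2.1, pvNeqBeq _ _ n1.2.2.2.2.2.2.2.2.1, pvNeqBeq _ _ n1.2.2.2.2.2.2.2.2.2.1, pvNeqBeq _ _ n1.2.2.2.2.2.2.2.2.2.2.1, pvNeqBeq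 _ _ n1.2.2.2.2.2.2.2.2.2.2.2.1, pvNeqBeq _ _ n1.2.2.2.2.2.2.2.2.2.2.2.2.1, pvNeqBeq _ _ n1.2.2.2.2.2.2.2.2.2.2.2.2.2.1, pvNeqBeq _ _ n1.2.2.2.2.2.2.2.2.2.2.2.2.2.2.1, pvNeqBeq _ _ n1.2.2.2.2.2.2.2.2.2.2.2.2.2.2.2.1, pvNeqBeq _ _ n1.2.2.2.2.2.2.2.2.2.2.2.2.2.2.2.2.1, pvNeqBeq _ _ n1.2.2.2.2.2.2.2.2.2.2.2.2.2.2.2.2.2.1, pvNeqBeq _ _ n1.2.2.2.2.2.2.2.2.2.2.2.2.2.2.2.2.2.2.1, pvNeqBeq _ _ n1.2.2.2.2.2.2.2.2.2.2.2.2.2.2.2.2.2.2.2.1, pvNeqBeq _ _ n1.2.2.2.2.2.2.2.2.2.2.2.2.2.2.2.2.2.2.2.2.1, pvNeqBeq _ _ n1.2.2.2.2.2.2.2.2.2.2.2.2.2.2.2.2.2.2.2.2.2, pvNeqBeq _ _ n2.1, pvNeqBeq _ _ n2.2.1, pvNeqBeq _ _ n2.2.2, pvNeqBeq _ _ n3.1,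 pvNeqBeq _ _ n3.2.1, pvNeqBeq _ _ n3.2.2.1, pvNeqBeq _ _ n3.2.2.2.1, pvNeqBeq _ _ n3.2.2.2.2.1, pvNeqBeq _ _ n3.2.2.2.2.2.1, pvNeqBeq _ _ n3.2.2.2.2.2.2.1, pvNeqBeq _ _ n3.2.2.2.2.2.2.2.1, pvNeqBeq _ _ n3.2.2.2.2.2.2.2.2.1, pvNeqBeq _ _ n3.2.2.2.2.2.2.2.2.2]

-- set-membership disjointness (aux beats art/prep, art beats prep)
theorem pvAux_disj (w : String) (h : w ∈ pvAuxSet) :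
    w ∉ pvArtSet ∧ w ∉ pvPrepSet := by
  simp only [pvAuxSet, PySem.Set.mem_ofList] at h
  fin_cases h <;> decide

theorem pvArt_disj (w : String) (h : w ∈ pvArtSet) : w ∉ pvPrepSet := by
  simp only [pvArtSet, PySem.Set.mem_ofList] at h
  fin_cases h <;> decide

-- the single pass computes exactly A's three filters, appended to the accumulators
theorem pvBucketLoop_eq (l : List String) (a b c : List String) :
    pvBucketLoop l (a, b, c) =
      (a ++ l.filter (fun w => PySem.Set.contains pvAuxSet w),
       b ++ l.filter (fun w => PySem.Set.contains pvArtSet w),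
       c ++ l.filter (fun w => PySem.Set.contains pvPrepSet w)) := by
  induction l generalizing a b c with
  | nil => simp [pvBucketLoop]
  | cons w rest ih =>
    rw [pvBucketLoop, pvCategory_spec]
    by_cases h1 : w ∈ pvAuxSet
    · obtain ⟨d1, d2⟩ := pvAux_disj w h1
      simp [h1, d1, d2, ih, List.filter_cons]
    · by_cases h2 : w ∈ pvArtSet
      · have d3 := pvArt_disj w h2
        simp [h1, h2, d3, ih, List.filter_cons]
      · by_cases h3 : w ∈ pvPrepSet
        · simp [h1, h2, h3, ih]
        · simp [h1, h2, h3, ih]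

-- ===== VERDICT (by name: the statement is the Claim_ definition above) =====
theorem classify_missing_words_spec : Claim_equal_classify_missing_words := by
  intro missing _
  unfold Spec_classify_missing_words classify_missing_words classify_missing_words_alt
  rw [pvBucketLoop_eq]
  simp
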